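-- pv_equiv track=rewrite | github.com/targed/test-projects | lexer/lexer.py | is_hexadecimal
-- ===== SOURCE A (Python) =====
-- def is_digit(char):
--     return '0' <= char <= '9'
--
-- def is_hex_digit(char):
--     return is_digit(char) or ('A' <= char <= 'F')
--
-- def is_hexadecimal(s):
--     if not s or len(s) < 2:
--         return False
--
--     # Must end with 'H'
--     if s[-1] != 'H':
--         return False
--
--     # Must have at least one hex digit before 'H'
--     pos = 0
--     while pos < len(s) - 1:
--         if not is_hex_digit(s[pos]):
--             return False
--         pos += 1
--
--     return True
-- ===== SOURCE B (Python) =====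
-- def is_hexadecimal(s):
--     # Table-driven DFA for the language [0-9A-F]+ H, one left-to-right pass,
--     # no length check, no slicing, no lookahead.
--     state = 0  # 0: start, 1: hex digits seen, 2: accepted, 3: dead
--     for c in s:
--         if state == 0 or state == 1:
--             if c in '0123456789ABCDEF':
--                 state = 1
--             elif c == 'H' and state == 1:
--                 state = 2
--             else:
--                 state = 3
--         else:
--             state = 3
--     return state == 2
-- ===== Notes on version B (the rewrite author's own statement) =====
-- stated objective: alternative
-- what changed: Replaced A's guard chain (length check, last-character test, index-driven while loop over the prefix) by a table-driven finite-state machine: a single left-to-right fold over the string with a 4-state DFA recognising [0-9A-F]+H, with no length check, slicing or negative indexing.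
import Mathlib
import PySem

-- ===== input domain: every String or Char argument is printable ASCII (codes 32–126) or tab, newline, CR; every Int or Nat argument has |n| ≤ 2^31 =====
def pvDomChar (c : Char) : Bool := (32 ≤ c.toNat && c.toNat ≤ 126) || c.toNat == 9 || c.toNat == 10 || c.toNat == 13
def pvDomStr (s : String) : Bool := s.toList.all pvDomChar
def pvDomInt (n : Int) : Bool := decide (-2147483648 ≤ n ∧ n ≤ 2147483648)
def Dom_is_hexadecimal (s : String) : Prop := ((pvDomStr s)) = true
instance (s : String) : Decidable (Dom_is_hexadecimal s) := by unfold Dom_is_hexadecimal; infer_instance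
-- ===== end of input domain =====

-- B replaces A's guard chain (length check, last-char test, while loop) by a
-- single-pass 4-state DFA fold recognising [0-9A-F]+H; objective: alternative.


-- ===== PORT A =====
def is_digit (c : Char) : Bool := decide ('0' ≤ c) && decide (c ≤ '9')

def is_hex_digit (c : Char) : Bool := is_digit c || (decide ('A' ≤ c) && decide (c ≤ 'F'))

-- the 'while pos < len(s) - 1' loop of A; s[pos] is always in range when read
def hexWhile (cs : List Char) (pos : Nat) : Bool :=
  if pos < cs.length - 1 then
    if !is_hex_digit (cs.getD pos ' ') then false
    else hexWhile cs (pos + 1)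
  else true
termination_by cs.length - 1 - pos

def is_hexadecimal (s : String) : Bool :=
  let cs := s.toList
  if cs.isEmpty || cs.length < 2 then false
  else if PySem.List.pyGetD cs (-1) ' ' ≠ 'H' then false  -- s[-1]; in range since len ≥ 2
  else hexWhile cs 0

-- ===== PORT B =====
def hexAlphabet : List Char := "0123456789ABCDEF".toList

-- one DFA transition: 0 start, 1 hex digits seen, 2 accepted, 3 dead
def dfaStep (st : Nat) (c : Char) : Nat :=
  if st = 0 || st = 1 then
    if hexAlphabet.contains c then 1
    else if c == 'H' && st == 1 then 2
    else 3
  else 3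

def is_hexadecimal_alt (s : String) : Bool := s.toList.foldl dfaStep 0 == 2

-- ===== PRECONDITION & SPEC =====
def Spec_is_hexadecimal (s : String) (out : Bool) : Prop := out = is_hexadecimal_alt s
instance (s : String) (out : Bool) : Decidable (Spec_is_hexadecimal s out) := by unfold Spec_is_hexadecimal; infer_instance

-- ===== CLAIM (what is proved, stated in full; the proofs are below) =====
def Claim_equal_is_hexadecimal : Prop := ∀ (s : String), Dom_is_hexadecimal s → Spec_is_hexadecimal s (is_hexadecimal s)

-- ===== LEMMAS AND PROOFS =====

lemma hex_char_eq (c : Char) : is_hex_digit c = hexAlphabet.contains c := by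
  have hA : hexAlphabet = ['0','1','2','3','4','5','6','7','8','9','A','B','C','D','E','F'] := rfl
  apply Bool.eq_iff_iff.mpr
  simp only [is_hex_digit, is_digit, Bool.or_eq_true, Bool.and_eq_true, decide_eq_true_eq,
    hA, List.contains_cons, List.contains_nil, beq_iff_eq, Char.le_def,
    Char.ext_iff, UInt32.le_iff_toNat_le, UInt32.toNat_inj.symm]
  constructor
  · rintro (⟨h1, h2⟩ | ⟨h1, h2⟩) <;> simp_all <;> omega
  · rintro (h|h|h|h|h|h|h|h|h|h|h|h|h|h|h|h) <;> simp_all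

lemma hexWhile_eq_aux (cs : List Char) :
    ∀ n pos, cs.length - 1 - pos ≤ n →
      hexWhile cs pos = ((cs.dropLast).drop pos).all is_hex_digit := by
  intro n
  induction n with
  | zero =>
    intro pos hp
    rw [hexWhile, if_neg (by omega)]
    have hnil : cs.dropLast.drop pos = [] :=
      List.drop_eq_nil_of_le (by simp [List.length_dropLast]; omega)
    simp [hnil]
  | succ n ih =>
    intro pos hp
    rw [hexWhile]
    by_cases h : pos < cs.length - 1
    · rw [if_pos h]
      have hlen : pos < cs.dropLast.length := by simp [List.length_dropLast]; omega
      rw [List.drop_eq_getElem_cons hlen]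
      have hget : cs.dropLast[pos] = cs.getD pos ' ' := by
        rw [List.getElem_dropLast, List.getD_eq_getElem cs ' ' (by omega)]
      rw [List.all_cons, hget]
      cases hcs : is_hex_digit (cs.getD pos ' ') with
      | false => simp
      | true =>
        rw [if_neg (by simp), ih (pos + 1) (by omega)]; simp
    · rw [if_neg h]
      have hnil : cs.dropLast.drop pos = [] :=
        List.drop_eq_nil_of_le (by simp [List.length_dropLast]; omega)
      simp [hnil]

-- A's result characterised: length ≥ 2, last char 'H', all others hex digits
lemma A_char (s : String) :
    is_hexadecimal s =
      (decide (2 ≤ s.toList.length) && (s.toList.getLast? == some 'H')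
        && s.toList.dropLast.all is_hex_digit) := by
  unfold is_hexadecimal
  simp only []
  rcases Nat.lt_or_ge s.toList.length 2 with hlt | hge
  · rw [if_pos (by rw [Bool.or_eq_true]; exact Or.inr (by rwa [decide_eq_true_eq]))]
    have h2 : decide (2 ≤ s.toList.length) = false := by
      rw [decide_eq_false_iff_not]; omega
    rw [h2, Bool.false_and, Bool.false_and]
  · have hne : s.toList ≠ [] := by intro h; rw [h] at hge; simp at hge
    have hie : s.toList.isEmpty = false := by
      rw [List.isEmpty_eq_false_iff]; exact hne
    have hdec : decide (s.toList.length < 2) = false := by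
      rw [decide_eq_false_iff_not]; omega
    rw [if_neg (by rw [hie, hdec]; simp)]
    have h2 : decide (2 ≤ s.toList.length) = true := by rw [decide_eq_true_eq]; exact hge
    rw [PySem.List.pyGetD_neg_one s.toList ' ' hne, h2, Bool.true_and]
    have hlast : s.toList.getLast? = some (s.toList.getLast hne) :=
      List.getLast?_eq_some_getLast hne
    by_cases hH : s.toList.getLast hne = 'H'
    · rw [if_neg (by simp [hH]), hexWhile_eq_aux s.toList s.toList.length 0 (by omega)]
      rw [List.drop_zero, hlast, hH]
      simp
    · rw [if_pos hH, hlast]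
      simp [hH]

lemma dfa_dead (l : List Char) : l.foldl dfaStep 3 = 3 := by
  induction l with
  | nil => rfl
  | cons c t ih => simpa [dfaStep] using ih

lemma dfa_two (l : List Char) : (l.foldl dfaStep 2 = 2) ↔ l = [] := by
  cases l with
  | nil => simp
  | cons c t =>
    have h : dfaStep 2 c = 3 := by simp [dfaStep]
    simp [h, dfa_dead]

lemma hex_ne_H (c : Char) (hc : c ∈ hexAlphabet) : c ≠ 'H' := by
  intro h; subst h; simp [hexAlphabet] at hc

lemma contains_of_mem (c : Char) (hc : c ∈ hexAlphabet) : hexAlphabet.contains c = true := by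
  simpa using hc

lemma contains_of_not_mem (c : Char) (hc : c ∉ hexAlphabet) : hexAlphabet.contains c = false := by
  simpa using hc

-- from state 1, the DFA accepts exactly 'hex digits then a final H'
lemma dfa_one (l : List Char) :
    (l.foldl dfaStep 1 = 2) ↔
      (l.dropLast.all is_hex_digit = true ∧ l.getLast? = some 'H') := by
  induction l with
  | nil => simp
  | cons c t ih =>
    by_cases hc : c ∈ hexAlphabet
    · have hstep : dfaStep 1 c = 1 := by simp [dfaStep, hc]
      rw [List.foldl_cons, hstep, ih]
      cases t with
      | nil => simp [hex_ne_H c hc]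
      | cons d u =>
        have hh : is_hex_digit c = true := by rw [hex_char_eq, contains_of_mem c hc]
        simp [List.dropLast_cons₂, List.getLast?_cons_cons, hh]
    · have hh : is_hex_digit c = false := by rw [hex_char_eq, contains_of_not_mem c hc]
      by_cases hH : c = 'H'
      · subst hH
        have hstep : dfaStep 1 'H' = 2 := by simp [dfaStep, hc]
        rw [List.foldl_cons, hstep, dfa_two]
        cases t with
        | nil => simp
        | cons d u => simp [List.dropLast_cons₂, hh]
      · have hstep : dfaStep 1 c = 3 := by simp [dfaStep, hc, hH]
        rw [List.foldl_cons, hstep]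
        cases t with
        | nil => simp [hH]
        | cons d u =>
          have h3 : dfaStep 3 d = 3 := by simp [dfaStep]
          simp [h3, dfa_dead, List.dropLast_cons₂, hh]

-- B's result characterised the same way
lemma B_char (s : String) :
    is_hexadecimal_alt s =
      (decide (2 ≤ s.toList.length) && (s.toList.getLast? == some 'H')
        && s.toList.dropLast.all is_hex_digit) := by
  unfold is_hexadecimal_alt
  cases hl : s.toList with
  | nil => simp
  | cons c t =>
    apply Bool.eq_iff_iff.mpr
    rw [beq_iff_eq]
    by_cases hc : c ∈ hexAlphabet
    · have hstep : dfaStep 0 c = 1 := by simp [dfaStep, hc]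
      rw [List.foldl_cons, hstep, dfa_one]
      cases t with
      | nil => simp
      | cons d u =>
        have hh : is_hex_digit c = true := by rw [hex_char_eq, contains_of_mem c hc]
        simp [List.dropLast_cons₂, List.getLast?_cons_cons, hh]
        tauto
    · have hstep : dfaStep 0 c = 3 := by simp [dfaStep, hc]
      rw [List.foldl_cons, hstep]
      have hh : is_hex_digit c = false := by rw [hex_char_eq, contains_of_not_mem c hc]
      cases t with
      | nil => simp
      | cons d u =>
        have h3 : dfaStep 3 d = 3 := by simp [dfaStep]
        simp [h3, dfa_dead, List.dropLast_cons₂, hh]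

-- ===== VERDICT (by name: the statement is the Claim_ definition above) =====
theorem is_hexadecimal_spec : Claim_equal_is_hexadecimal := by
  intro s _
  show is_hexadecimal s = is_hexadecimal_alt s
  rw [A_char, B_char]
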